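-- pv_equiv track=rewrite | github.com/cjy93/Object-Detection-with-ImageAI-on-Streamlit-Deployed-on-Heroku | src/features/feature.py | _get_counts_per_class
-- ===== SOURCE A (Python) =====
-- def _get_counts_per_class(list_boxes) -> dict:
--     """Gets the number of predictions found to be of a certain class
--     Args:
--         list_boxes (list): list of dictionaries (each dictionary is a
--         prediction outcome from a bounding box)
--
--     Returns:
--         counts_per_class (dict): dictionary with key-value pairs (class
--         name, count)
--     """
--     counts_per_class = dict()
--     for box in list_boxes:
--         if box["name"] in counts_per_class.keys():
--             counts_per_class[box["name"]] += 1
--         else: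
--             counts_per_class[box["name"]] = 1
--     return counts_per_class
-- ===== SOURCE B (Python) =====
-- def _get_counts_per_class(list_boxes) -> dict:
--     """Two-phase: collect all class names, then count each distinct name."""
--     names = [box["name"] for box in list_boxes]
--     return {name: names.count(name) for name in dict.fromkeys(names)}
-- ===== Notes on version B (the rewrite author's own statement) =====
-- stated objective: simpler
-- what changed: Replaces A's single-pass if/else counter accumulation with a two-phase comprehension: extract all names, then count each distinct name (dict.fromkeys + list.count).
import Mathlib
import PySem

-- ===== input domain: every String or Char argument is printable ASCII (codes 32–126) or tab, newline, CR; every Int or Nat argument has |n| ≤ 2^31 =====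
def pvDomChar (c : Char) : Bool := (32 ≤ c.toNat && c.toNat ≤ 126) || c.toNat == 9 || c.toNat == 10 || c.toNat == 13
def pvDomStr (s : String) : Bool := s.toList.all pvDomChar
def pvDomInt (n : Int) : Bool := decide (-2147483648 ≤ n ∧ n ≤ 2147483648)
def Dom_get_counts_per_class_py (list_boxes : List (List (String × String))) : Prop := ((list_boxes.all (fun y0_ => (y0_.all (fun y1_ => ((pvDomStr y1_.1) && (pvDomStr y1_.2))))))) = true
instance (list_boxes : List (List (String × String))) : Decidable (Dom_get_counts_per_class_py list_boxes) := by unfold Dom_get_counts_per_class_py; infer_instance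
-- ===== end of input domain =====

-- B counts by a two-phase 'collect names, then count each distinct name' comprehension instead of A's incremental if/else counter; return value equivalence.

-- ===== PORT A =====
-- counts_per_class = {}; for box: if box["name"] in keys: +=1 else =1.
-- box["name"] would raise KeyError when absent; that case (excluded by Pre_) leaves the state unchanged here.
def get_counts_per_class_py (list_boxes : List (List (String × String))) : List (String × Int) :=
  (list_boxes.foldl (fun (d : PySem.Dict String Int) box =>
      match (PySem.Dict.ofList box).get? "name" with
      | some n => if d.contains n then d.insert n (d.getD n 0 + 1) else d.insert n 1
      | none => d) PySem.Dict.empty).items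

-- ===== PORT B =====
-- names = [box["name"] for box in list_boxes]; {name: names.count(name) for name in dict.fromkeys(names)}
def get_counts_per_class_py_alt (list_boxes : List (List (String × String))) : List (String × Int) :=
  let names := list_boxes.map (fun box => ((PySem.Dict.ofList box).get? "name").getD "")
  (PySem.List.dedup names).map (fun n => (n, (names.count n : Int)))

-- ===== PRECONDITION & SPEC =====
-- Pre_ excludes exactly the inputs where Python A raises KeyError: a box without a "name" key.
def Pre_get_counts_per_class_py (list_boxes : List (List (String × String))) : Prop :=
  (list_boxes.all (fun box => (PySem.Dict.ofList box).contains "name")) = true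
instance (list_boxes : List (List (String × String))) : Decidable (Pre_get_counts_per_class_py list_boxes) := by unfold Pre_get_counts_per_class_py; infer_instance

def pvWitness_get_counts_per_class_py : (List (List (String × String))) :=
  [[("name", "car")], [("name", "dog"), ("prob", "0.9")], [("name", "car")]]

def Spec_get_counts_per_class_py (list_boxes : List (List (String × String))) (out : List (String × Int)) : Prop := out = get_counts_per_class_py_alt list_boxes
instance (list_boxes : List (List (String × String))) (out : List (String × Int)) : Decidable (Spec_get_counts_per_class_py list_boxes out) := by unfold Spec_get_counts_per_class_py; infer_instance

-- ===== CLAIM (what is proved, stated in full; the proofs are below) =====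
def Claim_equal_get_counts_per_class_py : Prop := ∀ (list_boxes : List (List (String × String))), Dom_get_counts_per_class_py list_boxes → Pre_get_counts_per_class_py list_boxes → Spec_get_counts_per_class_py list_boxes (get_counts_per_class_py list_boxes)

-- ===== LEMMAS AND PROOFS =====

-- A's branchy step, on a contained key, is exactly the counter step.
theorem pv_step_eq (d : PySem.Dict String Int) (n : String) :
    (if d.contains n then d.insert n (d.getD n 0 + 1) else d.insert n 1) =
      d.insert n (d.getD n 0 + 1) := by
  by_cases h : d.contains n = true
  · simp [h]
  · simp only [Bool.not_eq_true] at h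
    simp [h, PySem.Dict.getD_of_not_contains]

-- Under Pre_, A's fold over boxes is the counter fold over the extracted names.
theorem pv_fold_eq (list_boxes : List (List (String × String)))
    (hpre : (list_boxes.all (fun box => (PySem.Dict.ofList box).contains "name")) = true)
    (d : PySem.Dict String Int) :
    list_boxes.foldl (fun (d : PySem.Dict String Int) box =>
      match (PySem.Dict.ofList box).get? "name" with
      | some n => if d.contains n then d.insert n (d.getD n 0 + 1) else d.insert n 1
      | none => d) d =
    (list_boxes.map (fun box => ((PySem.Dict.ofList box).get? "name").getD "")).foldl
      (fun (d : PySem.Dict String Int) x => d.insert x (d.getD x 0 + 1)) d := by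
  induction list_boxes generalizing d with
  | nil => rfl
  | cons box rest ih =>
    simp only [List.all_cons, Bool.and_eq_true] at hpre
    obtain ⟨hb, hrest⟩ := hpre
    rw [PySem.Dict.contains_eq_isSome_get?] at hb
    obtain ⟨n, hn⟩ := Option.isSome_iff_exists.mp hb
    simp only [List.foldl_cons, List.map_cons]
    have h1 : (match (PySem.Dict.ofList box).get? "name" with
        | some n => if d.contains n then d.insert n (d.getD n 0 + 1) else d.insert n 1
        | none => d) =
        d.insert (((PySem.Dict.ofList box).get? "name").getD "")
          (d.getD (((PySem.Dict.ofList box).get? "name").getD "") 0 + 1) := by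
      rw [hn]
      exact pv_step_eq d n
    rw [h1]
    exact ih hrest _

-- ===== VERDICT (by name: the statement is the Claim_ definition above) =====
theorem get_counts_per_class_py_spec : Claim_equal_get_counts_per_class_py := by
  intro list_boxes _ hpre
  unfold Spec_get_counts_per_class_py get_counts_per_class_py
  rw [pv_fold_eq list_boxes hpre, PySem.Dict.foldl_insert_getD_add_one_eq_counter,
    PySem.Dict.items_counter]
  simp [get_counts_per_class_py_alt, PySem.List.dedup_eq_ofList]
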